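-- pv_equiv track=rewrite | github.com/gelafin/cs162-python-portfolio-project | FocusGame.py | make_row_basic
-- ===== SOURCE A (Python) =====
-- def make_row_basic(board_length, pattern, starting_color):
--     """
--     generates a row based on desired pattern
--     :param board_length: number of columns in the board
--     :param pattern: for initial pattern; number of same color to place (left-to-right) before switching colors
--     :param starting_color: either 'R' or 'G'; which color to place first, at the left of the row
--     :return: the generated row
--     """
--     row = []
--     count = 0
--     alternate = starting_color
--     for column_index in range(board_length):
--         row.append([alternate])
--
--         # hey, we just added a piece. Maintain counter
--         count += 1
--         if count >= pattern:  # if done with red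
--             count = 0
--             alternate = 'G' if alternate == 'R' else 'R'
--
--     return row
-- ===== SOURCE B (Python) =====
-- def _flip(color):
--     return 'G' if color == 'R' else 'R'
--
--
-- def make_row_basic(board_length, pattern, starting_color):
--     """Stateless re-implementation: the color of column i is computed directly
--     from its block index i // pattern (no running counter or flip-state).
--     When pattern <= 0 the original flips after every cell, i.e. period 1."""
--     period = pattern if pattern > 0 else 1
--     flipped = _flip(starting_color)
--     row = []
--     for i in range(board_length):
--         block = i // period
--         if block == 0:
--             color = starting_color
--         elif block % 2 == 1:
--             color = flipped
--         else:
--             color = _flip(flipped)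
--         row.append([color])
--     return row
-- ===== Notes on version B (the rewrite author's own statement) =====
-- stated objective: alternative
-- what changed: Replaced the stateful loop carrying a running counter and a flip-state across iterations by a stateless index-to-color computation: the color of column i is read off the parity of its block index i // pattern (period 1 when pattern <= 0, matching A's flip-every-cell behaviour).
import Mathlib
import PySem

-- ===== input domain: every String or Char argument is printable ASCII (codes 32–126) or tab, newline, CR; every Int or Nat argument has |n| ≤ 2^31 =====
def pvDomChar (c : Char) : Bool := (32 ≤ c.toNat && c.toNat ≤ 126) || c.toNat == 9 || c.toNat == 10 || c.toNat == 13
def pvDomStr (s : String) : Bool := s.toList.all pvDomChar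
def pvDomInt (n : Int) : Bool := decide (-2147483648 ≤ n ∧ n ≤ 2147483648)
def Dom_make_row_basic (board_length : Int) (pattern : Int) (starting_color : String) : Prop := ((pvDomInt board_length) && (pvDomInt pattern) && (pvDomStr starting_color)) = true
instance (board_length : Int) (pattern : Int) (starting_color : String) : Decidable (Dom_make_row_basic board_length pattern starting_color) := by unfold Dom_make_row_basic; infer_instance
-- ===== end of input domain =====

-- B replaces A's stateful counter/flip-state loop by a stateless index→color computation (block parity); same cost, alternative decomposition.


-- ===== PORT A =====
-- loop body of A: state = (row, count, alternate)
def pvStepA (pattern : Int) (st : List (List String) × Int × String) (_i : Int) :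
    List (List String) × Int × String :=
  let row := st.1 ++ [[st.2.2]]
  let count := st.2.1 + 1
  if count ≥ pattern then (row, 0, if st.2.2 = "R" then "G" else "R")
  else (row, count, st.2.2)

def make_row_basic (board_length : Int) (pattern : Int) (starting_color : String) : List (List String) :=
  ((PySem.List.pyRange 0 board_length 1).foldl (pvStepA pattern) ([], 0, starting_color)).1

-- ===== PORT B =====
def pvFlip (color : String) : String := if color = "R" then "G" else "R"

-- color of column i from its block index alone (Source B's loop body)
def pvColorAt (period : Int) (starting flipped : String) (i : Int) : String :=
  let block := PySem.Int.floordiv i period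
  if block = 0 then starting
  else if PySem.Int.mod block 2 = 1 then flipped
  else pvFlip flipped

def make_row_basic_alt (board_length : Int) (pattern : Int) (starting_color : String) : List (List String) :=
  let period := if pattern > 0 then pattern else 1
  let flipped := pvFlip starting_color
  (PySem.List.pyRange 0 board_length 1).foldl
    (fun row i => row ++ [[pvColorAt period starting_color flipped i]]) []

-- ===== PRECONDITION & SPEC =====
def Spec_make_row_basic (board_length : Int) (pattern : Int) (starting_color : String) (out : List (List String)) : Prop := out = make_row_basic_alt board_length pattern starting_color
instance (board_length : Int) (pattern : Int) (starting_color : String) (out : List (List String)) : Decidable (Spec_make_row_basic board_length pattern starting_color out) := by unfold Spec_make_row_basic; infer_instance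

-- ===== CLAIM (what is proved, stated in full; the proofs are below) =====
def Claim_equal_make_row_basic : Prop := ∀ (board_length : Int) (pattern : Int) (starting_color : String), Dom_make_row_basic board_length pattern starting_color → Spec_make_row_basic board_length pattern starting_color (make_row_basic board_length pattern starting_color)

-- ===== LEMMAS AND PROOFS =====

theorem pvFlip_pvFlip_pvFlip (s : String) : pvFlip (pvFlip (pvFlip s)) = pvFlip s := by
  unfold pvFlip; by_cases h : s = "R" <;> simp [h]

-- division-algorithm steps for a positive divisor
theorem pv_sdiv (a b : Int) (hb : 0 < b) (h : a % b + 1 < b) :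
    (a+1)/b = a/b ∧ (a+1) % b = a % b + 1 := by
  have h1 := Int.emod_nonneg a (by omega : b ≠ 0)
  have h2 := Int.mul_ediv_add_emod a b
  exact (Int.ediv_emod_unique hb (a := a+1) (b := b) (q := a/b) (r := a % b + 1)).mpr
    ⟨by omega, by omega, by omega⟩

theorem pv_fdiv (a b : Int) (hb : 0 < b) (h : a % b + 1 = b) :
    (a+1)/b = a/b + 1 ∧ (a+1) % b = 0 := by
  have h2 := Int.mul_ediv_add_emod a b
  exact (Int.ediv_emod_unique hb (a := a+1) (b := b) (q := a/b + 1) (r := 0)).mpr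
    ⟨by nlinarith, by omega, by omega⟩

-- block index steps: same block while (n % period) + 1 < period, next block when it reaches period
theorem pvColorAt_succ_same (period : Int) (s : String) (n : Int) (_hn : 0 ≤ n) (hp : 0 < period)
    (h : PySem.Int.mod n period + 1 < period) :
    pvColorAt period s (pvFlip s) (n + 1) = pvColorAt period s (pvFlip s) n := by
  rw [PySem.Int.mod_eq_emod_of_pos hp] at h
  unfold pvColorAt
  rw [PySem.Int.floordiv_eq_ediv_of_pos hp, PySem.Int.floordiv_eq_ediv_of_pos hp,
    (pv_sdiv n period hp h).1]

theorem pvColorAt_succ_flip (period : Int) (s : String) (n : Int) (hn : 0 ≤ n) (hp : 0 < period)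
    (h : PySem.Int.mod n period + 1 = period) :
    pvColorAt period s (pvFlip s) (n + 1) = pvFlip (pvColorAt period s (pvFlip s) n) := by
  rw [PySem.Int.mod_eq_emod_of_pos hp] at h
  unfold pvColorAt
  rw [PySem.Int.floordiv_eq_ediv_of_pos hp, PySem.Int.floordiv_eq_ediv_of_pos hp,
    (pv_fdiv n period hp h).1]
  set q := n / period with hq
  have hq0 : 0 ≤ q := Int.ediv_nonneg hn (by omega)
  simp only [PySem.Int.mod_eq_emod_of_pos (by norm_num : (0:Int) < 2)]
  by_cases h0 : q = 0
  · simp [h0, pvFlip]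
  · rw [if_neg (by omega), if_neg h0]
    by_cases hpar : q % 2 = 1
    · rw [if_neg (by omega), if_pos hpar]
    · rw [if_pos (by omega), if_neg hpar, pvFlip_pvFlip_pvFlip]

-- main loop invariant: after n iterations the row holds the colors of cells 0..n-1,
-- count = n % period and alternate = the color of cell n
theorem pv_loop (pattern : Int) (s : String) (n : Nat) :
    (PySem.List.pyRange 0 (n : Int) 1).foldl (pvStepA pattern) ([], 0, s)
      = ((PySem.List.pyRange 0 (n : Int) 1).foldl
            (fun row i => row ++ [[pvColorAt (if pattern > 0 then pattern else 1) s (pvFlip s) i]]) [],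
         PySem.Int.mod (n : Int) (if pattern > 0 then pattern else 1),
         pvColorAt (if pattern > 0 then pattern else 1) s (pvFlip s) (n : Int)) := by
  set P := if pattern > 0 then pattern else 1 with hP
  have hp : 0 < P := by rw [hP]; split <;> omega
  induction n with
  | zero =>
      rw [show ((0 : Nat) : Int) = 0 by norm_num, PySem.List.pyRange_one_eq_nil (by omega)]
      simp [PySem.Int.mod_eq_emod_of_pos hp, pvColorAt,
        PySem.Int.floordiv_eq_ediv_of_pos hp]
  | succ n ih =>
      have hcast : ((n + 1 : Nat) : Int) = (n : Int) + 1 := by push_cast; ring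
      rw [hcast, PySem.List.pyRange_one_succ_right (by positivity), List.foldl_append,
        List.foldl_append, ih]
      set m := PySem.Int.mod (n : Int) P with hm
      have hm0 : 0 ≤ m := PySem.Int.mod_nonneg _ hp
      have hm1 : m < P := PySem.Int.mod_lt _ hp
      have hcond : (m + 1 ≥ pattern) ↔ (m + 1 ≥ P) := by
        rw [hP]; split
        · exact Iff.rfl
        · constructor <;> intro <;> omega
      simp only [List.foldl_cons, List.foldl_nil, pvStepA]
      by_cases hge : m + 1 ≥ pattern
      · have hgeP : m + 1 = P := by have := hcond.mp hge; omega
        rw [if_pos hge]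
        have hmod : PySem.Int.mod ((n : Int) + 1) P = 0 := by
          rw [PySem.Int.mod_eq_emod_of_pos hp]
          exact (pv_fdiv (n : Int) P hp (by rw [← PySem.Int.mod_eq_emod_of_pos hp]; exact hgeP)).2
        rw [pvColorAt_succ_flip P s (n : Int) (by positivity) hp hgeP]
        simp [hmod, pvFlip]
      · have hltP : m + 1 < P := by
          rcases lt_or_ge (m + 1) P with h | h
          · exact h
          · exact absurd (hcond.mpr h) hge
        rw [if_neg hge]
        have hmod : PySem.Int.mod ((n : Int) + 1) P = m + 1 := by
          rw [PySem.Int.mod_eq_emod_of_pos hp]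
          rw [hm, PySem.Int.mod_eq_emod_of_pos hp]
          exact (pv_sdiv (n : Int) P hp (by rw [← PySem.Int.mod_eq_emod_of_pos hp, ← hm]; exact hltP)).2
        rw [pvColorAt_succ_same P s (n : Int) (by positivity) hp hltP, hmod]

-- ===== VERDICT (by name: the statement is the Claim_ definition above) =====
theorem make_row_basic_spec : Claim_equal_make_row_basic := by
  intro bl pattern s _
  unfold Spec_make_row_basic make_row_basic make_row_basic_alt
  by_cases hb : bl ≤ 0
  · rw [PySem.List.pyRange_one_eq_nil (by omega)]; rfl
  · obtain ⟨n, rfl⟩ : ∃ n : Nat, bl = (n : Int) := ⟨bl.toNat, by omega⟩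
    rw [pv_loop]
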